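/- GENERATED by mk_final_copies.py from the proof of the farm's unit `vorbis_finish_frame.1` (farm:vorbis_finish_frame.1.1: Proof.lean) as the
   re-elaboration sweep compiled it — do not edit. -/
import Asan.CheckWalk
import Vorbis.Spec.MdctUse
import Vorbis.Spec.Units.vorbis_finish_frame_1

open X86 X86.User Asan Vorbis Vorbis.Spec

set_option maxRecDepth 4000
set_option maxHeartbeats 4000000

/-- Segment 1 of `vorbis_finish_frame` (entry … `cut2` | `at_1071ae` | `ret`). -/
theorem Vorbis.Spec.Worked.vorbis_finish_frame_1_ok : Vorbis.Spec.vorbis_finish_frame_1.Statement := by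
  intro Lay hLay μ hμ u₀ hcode hload4 hgw others frames len A stored room ysz u ret f he hpre hf
  have he0 := he
  v_entry he
  have hr : u.reg .rdi = addr f := eq_addr _ _ hf
  obtain ⟨hsh, hinv0, hfp⟩ := hpre
  rw [hf] at hinv0 hfp
  have hsp := hsh.rsp
  have hwhere := hinv0.objLive.where_ hsh.inv hsh.offText (by simp only [Vorbis.Off.sizeof.stb_vorbis]; omega)
  simp only [Vorbis.Off.sizeof.stb_vorbis] at hwhere
  have hfa : (addr f).toNat = f := toNat_addr f (by omega)
  have har : A.B ≤ f ∧ f + 1808 ≤ A.B + A.L := by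
    have hbr := hinv0.arena.block_range (p := f) (n := Off.sizeof.stb_vorbis) hinv0.obj
    have hl := le_r8 Off.sizeof.stb_vorbis
    have h2 := hinv0.arena.AR2
    simp only [Vorbis.Off.sizeof.stb_vorbis] at hbr hl
    omega
  have hgw' := hgw others frames
  -- the stack window misses `*f` and every allocated block
  have hstk_ok : StoreOK (RunBlk A len) u.mem f ⟨(u.reg .rsp).toNat - 144, (u.reg .rsp).toNat⟩ := by
    apply StoreOK.off
    intro B hB
    have := hinv0.offStack B hB
    simp only []
    omega
  have hstk_off : (u.reg .rsp).toNat ≤ f ∨ f + 1808 ≤ (u.reg .rsp).toNat - 144 := by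
    omega
  obtain ⟨pl, rpl⟩ : ∃ pl, u.mem.readLE (addr f + 1256) 4 = pl := ⟨_, rfl⟩
  obtain ⟨ch, rch⟩ : ∃ ch, u.mem.readLE (addr f + 4) 4 = ch := ⟨_, rfl⟩
  -- HD1: `1 ≤ channels ≤ 16`, about the dword the outer test loads
  have hchv : stb_vorbis.channels u.mem f = sint32 ch := by
    simp only [vacc, voff]
    unfold Mem.i32 Mem.u32
    rw [← addr_add_lit, rch]
  have hchlt : ch < 2 ^ 32 := by
    rw [← rch]
    exact X86.User.Mem.readLE_lt' _ _ 4
  have hhd1 := (Real.VorbisOK.config hinv0.fb.vorbis).header.HD1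
  rw [hchv] at hhd1
  have hch : 1 ≤ ch ∧ ch ≤ 16 := by
    unfold sint32 at hhd1
    split at hhd1 <;> omega
  u_walk hcode [hμ.vendor] until [Vorbis.L.vorbis_finish_frame.cut2, Vorbis.L.vorbis_finish_frame.at_1071ae] span [Vorbis.L.textLo, Vorbis.L.textHi] side (v_side)
  case check_107083 =>
    have hun' : ShadowUntouched u.mem s_107083.mem := by v_untouched
    refine hinv0.objLive.accSmall hsh.inv hun' _ 4 (by decide) (by u_omega) ?_
    simp only [Vorbis.Off.sizeof.stb_vorbis]
    u_omega
  case call_inv => v_inv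
  case pre_10709f =>
    refine ⟨?_, ?_⟩
    · refine hsh.callee ?_ ?_ ?_ ?_
      · v_untouched
      · rw [w_rsp]
        u_omega
      · rw [w_rsp]
        u_omega
      · rw [w_rsp]
        u_omega
    · rw [w_rdi, hfa]
      exact LiveBytes.of_liveIn hinv0.objLive
  · -- `previous_length = 0`: at the join
    refine ReachVia.done (Or.inr (Or.inl ?_))
    have hst : Mem.SameExcept [⟨(u.reg .rsp).toNat - 144, (u.reg .rsp).toNat⟩] u.mem s_107094.mem := by
      rw [w_mem]
      u_same
    have hun1 : ShadowUntouched u.mem s_107094.mem := by v_untouched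
    have hc := Vorbis.Spec.vorbis_finish_frame.ff_inv_off hinv0 hst (by
      intro sp hmem
      simp only [List.mem_cons, List.mem_nil_iff, or_false] at hmem
      rcases hmem with rfl
      exact hstk_ok) (by
      intro sp hmem
      simp only [List.mem_cons, List.mem_nil_iff, or_false] at hmem
      rcases hmem with rfl
      simp only []
      exact hstk_off) hun1
    have hsameN : Mem.SameExcept [⟨(u.reg .rsp).toNat - 144, (u.reg .rsp).toNat⟩, ⟨A.B, A.B + A.L⟩] u.mem s_107094.mem := by
      apply hst.mono
      intro sp hmem
      simp only [List.mem_cons, List.mem_nil_iff, or_false] at hmem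
      rcases hmem with rfl
      intro a ha1 ha2
      exact ⟨_, List.mem_cons_self, ha1, ha2⟩
    refine ⟨w_rip, ⟨he0, hr, hsh, hinv0, hfp, w_rsp, w_rbx, w_eq, ?abi, ?_, ?_, ?_, ?_, ?_, ?_, ?_, ?_, ?_, ?_, hsameN,
      hun1, w_acc_107083⟩, hc.1, hc.2⟩
    case abi => v_inv
    all_goals u_resolve
    all_goals (rw [Asan.part32_toNat]; omega)
  · -- after the call of get_window: the returned state's facts under the walker's names, the callee's footprint as numbers
    have w_eq := Vorbis.conv_code_eqOn w_code
    have w_df : s_10709fr.flags .df = false := (show abiInv _ from w_inv).1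
    have w_mx : s_10709fr.mxcsr &&& 0x1F80 = 0x1F80 := (show abiInv _ from w_inv).2
    have w_sse := Vorbis.sseOK_of_abiInv w_inv
    simp only [X86.User.Spec.footprint, vspec, w_rsp_10709f] at w_same
    have hp0 : UInt64.ofNat (s_10709f.mem.readLE (u.reg .rsp) 8) = ret := by u_resolve
    have hs0 : UInt64.ofNat (s_10709fr.mem.readLE (u.reg .rsp) 8) = ret := by u_frame hp0
    have hp1 : UInt64.ofNat (s_10709f.mem.readLE (u.reg .rsp - 8) 8) = u.reg .r15 := by u_resolve
    have hs1 : UInt64.ofNat (s_10709fr.mem.readLE (u.reg .rsp - 8) 8) = u.reg .r15 := by u_frame hp1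
    have hp2 : UInt64.ofNat (s_10709f.mem.readLE (u.reg .rsp - 16) 8) = u.reg .r14 := by u_resolve
    have hs2 : UInt64.ofNat (s_10709fr.mem.readLE (u.reg .rsp - 16) 8) = u.reg .r14 := by u_frame hp2
    have hp3 : UInt64.ofNat (s_10709f.mem.readLE (u.reg .rsp - 24) 8) = u.reg .r13 := by u_resolve
    have hs3 : UInt64.ofNat (s_10709fr.mem.readLE (u.reg .rsp - 24) 8) = u.reg .r13 := by u_frame hp3
    have hp4 : UInt64.ofNat (s_10709f.mem.readLE (u.reg .rsp - 32) 8) = u.reg .r12 := by u_resolve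
    have hs4 : UInt64.ofNat (s_10709fr.mem.readLE (u.reg .rsp - 32) 8) = u.reg .r12 := by u_frame hp4
    have hp5 : UInt64.ofNat (s_10709f.mem.readLE (u.reg .rsp - 40) 8) = u.reg .rbp := by u_resolve
    have hs5 : UInt64.ofNat (s_10709fr.mem.readLE (u.reg .rsp - 40) 8) = u.reg .rbp := by u_frame hp5
    have hp6 : UInt64.ofNat (s_10709f.mem.readLE (u.reg .rsp - 48) 8) = u.reg .rbx := by u_resolve
    have hs6 : UInt64.ofNat (s_10709fr.mem.readLE (u.reg .rsp - 48) 8) = u.reg .rbx := by u_frame hp6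
    have hp7 : s_10709f.mem.readLE (u.reg .rsp - 88) 4 = (Word.part .w32 (u.reg .rsi)).toNat := by
      u_resolve
      rw [Asan.part32_toNat]
      omega
    have hs7 : s_10709fr.mem.readLE (u.reg .rsp - 88) 4 = (Word.part .w32 (u.reg .rsi)).toNat := by u_frame hp7
    have hp8 : s_10709f.mem.readLE (u.reg .rsp - 84) 4 = (Word.part .w32 (u.reg .rcx)).toNat := by
      u_resolve
      rw [Asan.part32_toNat]
      omega
    have hs8 : s_10709fr.mem.readLE (u.reg .rsp - 84) 4 = (Word.part .w32 (u.reg .rcx)).toNat := by u_frame hp8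
    have hp9 : s_10709f.mem.readLE (u.reg .rsp - 60) 4 = (Word.part .w32 (u.reg .rdx)).toNat := by
      u_resolve
      rw [Asan.part32_toNat]
      omega
    have hs9 : s_10709fr.mem.readLE (u.reg .rsp - 60) 4 = (Word.part .w32 (u.reg .rdx)).toNat := by u_frame hp9
    have hp10 : s_10709f.mem.readLE (u.reg .rsp - 72) 4 = (BitVec.ofNat 32 pl).toNat := by
      u_resolve
      rw [BitVec.toNat_ofNat]
      omega
    have hs10 : s_10709fr.mem.readLE (u.reg .rsp - 72) 4 = (BitVec.ofNat 32 pl).toNat := by u_frame hp10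
    rw [w_mem_10709f] at w_same
    have hsame' : Mem.SameExcept [⟨(u.reg .rsp).toNat - 144, (u.reg .rsp).toNat⟩] u.mem s_10709fr.mem := by
      u_same
    have hunr : ShadowUntouched u.mem s_10709fr.mem := by v_untouched
    -- `channels` in the returned memory (outside the stack window)
    have hsc : s_10709fr.mem.readLE (addr f + 4) 4 = ch := by
      rw [hsame'.readLE (addr f + 4) 4 (by u_omega) ?_]
      · exact rch
      · intro w hw
        have e1 : w = ⟨(u.reg .rsp).toNat - 144, (u.reg .rsp).toNat⟩ := List.mem_singleton.mp hw
        subst e1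
        simp only
        u_omega
    obtain ⟨z, j_rax⟩ : ∃ z, s_10709fr.reg .rax = z := ⟨_, rfl⟩
    have w_rax := j_rax
    u_walk hcode [hμ.vendor] until [Vorbis.L.vorbis_finish_frame.cut2, Vorbis.L.vorbis_finish_frame.at_1071ae] span [Vorbis.L.textLo, Vorbis.L.textHi] side (v_side)
    case check_107198 =>
      have hun1 : ShadowUntouched s_10709fr.mem s_107198.mem := by v_untouched
      have hun' : ShadowUntouched u.mem s_107198.mem := Mem.EqOn.trans hunr hun1
      refine hinv0.objLive.accSmall hsh.inv hun' _ 4 (by decide) (by u_omega) ?_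
      simp only [Vorbis.Off.sizeof.stb_vorbis]
      u_omega
    · -- get_window returned NULL: `return 0`
      refine ReachVia.done (Or.inr (Or.inr ?_))
      have hst : Mem.SameExcept [⟨(u.reg .rsp).toNat - 144, (u.reg .rsp).toNat⟩] s_10709fr.mem s_10729b.mem := by
        rw [w_mem]
        u_same
      have hun1 : ShadowUntouched s_10709fr.mem s_10729b.mem := by v_untouched
      have hstU := hsame'.trans hst
      have hunU : ShadowUntouched u.mem s_10729b.mem := Mem.EqOn.trans hunr hun1
      have hpost := Vorbis.Spec.vorbis_finish_frame.ff_post_tail (m₀ := u.mem) hinv0 (ObjEq.refl _ _ _) hstU (by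
        intro w hw
        simp only [List.mem_cons, List.mem_nil_iff, or_false] at hw
        rcases hw with rfl
        left
        simp only []
        omega) hunU
      v_returned
      · show _ ∧ _ ∧ _ ∧ _ ∧ _
        rw [hr, hfa]
        refine ⟨hunU, hpost.1, hpost.2, ?_, ?_⟩
        · rw [w_rax]
          refine ⟨fun _ => ?_, Or.inl ?_⟩ <;> decide
        · rw [w_rax]
          exact Vorbis.Spec.vorbis_finish_frame.ff_ofBV32_lt _
    · -- the arm `channels ≤ 0` of the first outer test is dead (HD1)
      exfalso
      rw [Vorbis.Spec.vorbis_finish_frame.ff_ofNat32_toInt ch (by omega)] at hbr_1071a4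
      have hz : (0#32).toInt = 0 := by decide
      rw [hz] at hbr_1071a4
      omega
    · -- at the head of the mixing loop with `(i, j) = (0, 0)`: `n` = the dword `pl`, `w` = get_window's result
      refine ReachVia.done (Or.inl ⟨pl, z.toNat, ?_⟩)
      -- (1) the invariant at the call state (stack-only stores since the entry)
      have hstC : Mem.SameExcept [⟨(u.reg .rsp).toNat - 144, (u.reg .rsp).toNat⟩] u.mem s_10709f.mem := by
        rw [w_mem_10709f]
        u_same
      have hunC : ShadowUntouched u.mem s_10709f.mem := Mem.EqOn.trans hunr (Mem.EqOn.symm w_post.1)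
      have hcC := Vorbis.Spec.vorbis_finish_frame.ff_inv_off hinv0 hstC (by
        intro sp hmem
        simp only [List.mem_cons, List.mem_nil_iff, or_false] at hmem
        rcases hmem with rfl
        exact hstk_ok) (by
        intro sp hmem
        simp only [List.mem_cons, List.mem_nil_iff, or_false] at hmem
        rcases hmem with rfl
        simp only []
        exact hstk_off) hunC
      have hinvC := hcC.1
      have hd := ((Real.VorbisOK.config hinvC.fb.vorbis).header.HD3).toMdct
      have hm := hinvC.fb.vorbis.mdct
      have h7 := hinvC.fb.vorbis.buffers.M7
      have hb0 := hd.b0.facts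
      have hb1 := hd.b1.facts
      have hle := hd.le
      have hpllt : pl < 2 ^ 32 := by
        rw [← rpl]
        exact X86.User.Mem.readLE_lt' _ _ 4
      -- `previous_length` at the call state is the `int` of the dword `pl`
      have hplC : stb_vorbis.previous_length s_10709f.mem f = sint32 pl := by
        have e := hcC.2.i32 1256 (by decide)
        simp only [vacc, voff]
        rw [e]
        unfold Mem.i32 Mem.u32
        rw [← addr_add_lit, rpl]
      unfold Mdct.M7Range at h7
      rw [hplC] at h7
      have hrdiC : (s_10709f.reg .rdi).toNat = f := by
        rw [w_rdi_10709f]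
        exact hfa
      have hrsiC : (s_10709f.reg .rsi).toNat = pl := by
        rw [w_rsi_10709f, toNat_ofBV32, BitVec.toNat_ofNat]
        omega
      have hne : s_10709fr.reg .rax ≠ 0 := by
        rw [j_rax]
        intro h0
        apply hbr_1070ac
        rw [h0]
        rfl
      -- (2) the window block
      have hwb := get_window.window_block (Blk := RunBlk A len) (len := sint32 pl) w_post
        (by rw [hrdiC]; exact hd) (by rw [hrdiC]; exact hm) (by rw [hrdiC]; exact h7.1) (by rw [hrdiC]; exact h7.2)
        (by
          rw [hrsiC]
          unfold sint32
          split <;> omega) hne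
      -- (3) a non-NULL result: `2 pl` is a block size, so `pl` is a positive `int` and `2 pl ≤ b1`
      have e0 : s_10709f.mem.u32 (f + 152) = bsize s_10709f.mem f 0 := by
        have hb := hd.blocksize_0_eq
        simp only [vacc, voff] at hb
        unfold Mem.i32 sint32 at hb
        have hlt := Mem.u32_lt s_10709f.mem (f + 152)
        split at hb <;> omega
      have e1 : s_10709f.mem.u32 (f + 156) = bsize s_10709f.mem f 1 := by
        have hb := hd.blocksize_1_eq
        simp only [vacc, voff] at hb
        unfold Mem.i32 sint32 at hb
        have hlt := Mem.u32_lt s_10709f.mem (f + 156)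
        split at hb <;> omega
      have hkey : pl < 2 ^ 31 ∧ 2 * pl ≤ bsize s_10709f.mem f 1 := by
        obtain ⟨_, h0, h1, hnull⟩ := w_post
        rw [hrdiC, hrsiC] at h0 h1 hnull
        rw [e0] at h0 h1 hnull
        rw [e1] at h1 hnull
        have h7lo := h7.1
        unfold sint32 at h7lo
        by_cases c0 : bsize s_10709f.mem f 0 = (2 * pl) % 2 ^ 32
        · split at h7lo <;> omega
        · by_cases c1 : bsize s_10709f.mem f 1 = (2 * pl) % 2 ^ 32
          · split at h7lo <;> omega
          · exact absurd (hnull c0 c1) hne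
      have hsp : sint32 pl = (pl : Int) := by
        unfold sint32
        split <;> omega
      have hbs : bsize s_10709f.mem f 1 = bsize u.mem f 1 := (Mdct.ReadsEq.of_objEq (hcC.2.sub (by decide))).bsize 1
      -- (4) the exit assertion
      have hst : Mem.SameExcept [⟨(u.reg .rsp).toNat - 144, (u.reg .rsp).toNat⟩] s_10709fr.mem s_1071ac.mem := by
        rw [w_mem]
        u_same
      have hun1 : ShadowUntouched s_10709fr.mem s_1071ac.mem := by v_untouched
      have hstU := hsame'.trans hst
      have hunU : ShadowUntouched u.mem s_1071ac.mem := Mem.EqOn.trans hunr hun1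
      have hc := Vorbis.Spec.vorbis_finish_frame.ff_inv_off hinv0 hstU (by
        intro sp hmem
        simp only [List.mem_cons, List.mem_nil_iff, or_false] at hmem
        rcases hmem with rfl
        exact hstk_ok) (by
        intro sp hmem
        simp only [List.mem_cons, List.mem_nil_iff, or_false] at hmem
        rcases hmem with rfl
        simp only []
        exact hstk_off) hunU
      have hsameN : Mem.SameExcept [⟨(u.reg .rsp).toNat - 144, (u.reg .rsp).toNat⟩, ⟨A.B, A.B + A.L⟩] u.mem s_1071ac.mem := by
        apply hstU.mono
        intro sp hmem
        simp only [List.mem_cons, List.mem_nil_iff, or_false] at hmem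
        rcases hmem with rfl
        intro a ha1 ha2
        exact ⟨_, List.mem_cons_self, ha1, ha2⟩
      have hplv : stb_vorbis.previous_length u.mem f = sint32 pl := by
        simp only [vacc, voff]
        unfold Mem.i32 Mem.u32
        rw [← addr_add_lit, rpl]
      have hwin : RunBlk A len ⟨z.toNat, 4 * pl⟩ := by
        rw [j_rax, hsp] at hwb
        exact hwb
      refine ⟨w_rip, ⟨he0, hr, hsh, hinv0, hfp, w_rsp, w_rbx, w_eq, ?abi, ?_, ?_, ?_, ?_, ?_, ?_, ?_, ?_, ?_, ?_, hsameN,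
        hunU, w_acc_107083⟩, w_r12, ?sloti, ?slotn, ?slotw, ?neq, ?ilt, Nat.zero_le _, ?nle, hwin, hc.1, hc.2⟩
      case abi => v_inv
      case neq =>
        rw [hplv]
        exact hsp
      case ilt =>
        rw [hchv]
        omega
      case nle =>
        rw [← hbs]
        exact hkey.2
      case slotn =>
        u_resolve
        rw [BitVec.toNat_ofNat]
        omega
      case slotw => u_resolve
      all_goals u_resolve
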